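-- pv_equiv track=rewrite | github.com/quanpl86/IOSTEM-JSONIMPORT | data/curriculum backup/generate_all_maps.py | actions_to_xml
-- ===== SOURCE A (Python) =====
-- def actions_to_xml(actions: list) -> str:
--     """Chuyển đổi danh sách hành động thành chuỗi XML lồng nhau cho Blockly."""
--     if not actions:
--         return ""
--
--     action = actions[0]
--     # Đệ quy tạo chuỗi cho các khối còn lại
--     next_block_xml = actions_to_xml(actions[1:])
--     next_tag = f"<next>{next_block_xml}</next>" if next_block_xml else ""
--
--     if action == 'turnLeft' or action == 'turnRight':
--         direction = 'turnLeft' if action == 'turnLeft' else 'turnRight'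
--         return f'<block type="maze_turn"><field name="DIR">{direction}</field>{next_tag}</block>'
--
--     # Các action khác như moveForward, jump, collect, toggleSwitch
--     action_name = action.replace("maze_", "")
--     return f'<block type="maze_{action_name}">{next_tag}</block>'
-- ===== SOURCE B (Python) =====
-- def _block_open(action):
--     if action == 'turnLeft' or action == 'turnRight':
--         return f'<block type="maze_turn"><field name="DIR">{action}</field>'
--     return f'<block type="maze_{action.replace("maze_", "")}">'
--
-- def actions_to_xml(actions: list) -> str:
--     """Flat construction: join opening fragments, then append all closing tags at once."""
--     if not actions:
--         return ""
--     opens = [_block_open(a) for a in actions]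
--     return ("".join(o + "<next>" for o in opens[:-1])
--             + opens[-1] + "</block>"
--             + "</next></block>" * (len(actions) - 1))
-- ===== Notes on version B (the rewrite author's own statement) =====
-- stated objective: faster
-- what changed: Replaced A's recursion over actions[1:] (which re-slices the list and rebuilds the nested suffix at every level) with a flat construction: map each action to its opening fragment once, join them with <next>, and append all closing </next></block> tags in one repeated-string step.
import Mathlib
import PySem

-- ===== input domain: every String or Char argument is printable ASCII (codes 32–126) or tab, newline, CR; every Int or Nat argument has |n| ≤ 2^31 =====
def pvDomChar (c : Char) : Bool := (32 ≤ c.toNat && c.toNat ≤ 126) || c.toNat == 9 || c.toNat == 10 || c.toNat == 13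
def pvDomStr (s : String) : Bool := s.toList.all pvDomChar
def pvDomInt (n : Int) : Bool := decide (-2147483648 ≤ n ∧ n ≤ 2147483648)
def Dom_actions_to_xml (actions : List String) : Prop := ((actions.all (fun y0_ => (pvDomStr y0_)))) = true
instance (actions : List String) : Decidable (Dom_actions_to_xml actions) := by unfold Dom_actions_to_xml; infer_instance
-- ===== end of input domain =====

-- B builds the XML flat (join opening fragments with <next>, then append all closing tags
-- at once) instead of A's recursion over actions[1:]; same return value, no repeated slicing.

-- ===== PORT A =====
def actions_to_xml (actions : List String) : String :=
  match actions with
  | [] => ""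
  | action :: rest =>
    let next_block_xml := actions_to_xml rest
    let next_tag := if next_block_xml ≠ "" then "<next>" ++ next_block_xml ++ "</next>" else ""
    if action = "turnLeft" ∨ action = "turnRight" then
      let direction := if action = "turnLeft" then "turnLeft" else "turnRight"
      "<block type=\"maze_turn\"><field name=\"DIR\">" ++ direction ++ "</field>" ++ next_tag ++ "</block>"
    else
      let action_name := PySem.Str.replace action "maze_" ""
      "<block type=\"maze_" ++ action_name ++ "\">" ++ next_tag ++ "</block>"

-- ===== PORT B =====
def blockOpen (action : String) : String :=
  if action = "turnLeft" ∨ action = "turnRight" then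
    "<block type=\"maze_turn\"><field name=\"DIR\">" ++ action ++ "</field>"
  else
    "<block type=\"maze_" ++ PySem.Str.replace action "maze_" "" ++ "\">"

def actions_to_xml_alt (actions : List String) : String :=
  match actions with
  | [] => ""
  | _ =>
    let opens := actions.map blockOpen
    String.join (opens.dropLast.map (fun o => o ++ "<next>"))
      ++ (opens.getLast?.getD "") ++ "</block>"
      ++ String.join (List.replicate (actions.length - 1) "</next></block>")

-- ===== PRECONDITION & SPEC =====
def Spec_actions_to_xml (actions : List String) (out : String) : Prop := out = actions_to_xml_alt actions
instance (actions : List String) (out : String) : Decidable (Spec_actions_to_xml actions out) := by unfold Spec_actions_to_xml; infer_instance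

-- ===== CLAIM (what is proved, stated in full; the proofs are below) =====
def Claim_equal_actions_to_xml : Prop := ∀ (actions : List String), Dom_actions_to_xml actions → Spec_actions_to_xml actions (actions_to_xml actions)

-- ===== LEMMAS AND PROOFS =====

theorem str_foldl_append (l : List String) (a b : String) :
    l.foldl (· ++ ·) (a ++ b) = a ++ l.foldl (· ++ ·) b := by
  induction l generalizing b with
  | nil => rfl
  | cons x t ih => simp only [List.foldl_cons, String.append_assoc, ih]

theorem str_join_cons (s : String) (l : List String) :
    String.join (s :: l) = s ++ String.join l := by
  unfold String.join
  have h1 : ("" : String) ++ s = s ++ "" := by simp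
  simp only [List.foldl_cons, h1, str_foldl_append]

theorem str_join_append (l1 l2 : List String) :
    String.join (l1 ++ l2) = String.join l1 ++ String.join l2 := by
  induction l1 with
  | nil => simp [String.join]
  | cons x t ih => simp only [List.cons_append, str_join_cons, ih, String.append_assoc]

theorem A_cons (a : String) (rest : List String) :
    actions_to_xml (a :: rest) =
      blockOpen a ++
        ((if actions_to_xml rest = "" then "" else "<next>" ++ actions_to_xml rest ++ "</next>")
          ++ "</block>") := by
  conv_lhs => rw [actions_to_xml]
  by_cases h : a = "turnLeft" ∨ a = "turnRight"
  · rw [if_pos h]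
    rcases h with h | h <;> subst h <;>
      by_cases hc : actions_to_xml rest = "" <;> simp [blockOpen, hc, String.append_assoc]
  · rw [if_neg h]
    by_cases hc : actions_to_xml rest = "" <;> simp [blockOpen, h, hc, String.append_assoc]

theorem actions_to_xml_ne_empty (a : String) (rest : List String) :
    actions_to_xml (a :: rest) ≠ "" := by
  intro h
  rw [A_cons] at h
  have := congrArg String.length h
  by_cases hc : actions_to_xml rest = "" <;>
    simp [hc, String.length_append, blockOpen] at this

theorem alt_cons_cons (a b : String) (t : List String) :
    actions_to_xml_alt (a :: b :: t) =
      blockOpen a ++ "<next>" ++ actions_to_xml_alt (b :: t) ++ "</next></block>" := by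
  show String.join (((a :: b :: t).map blockOpen).dropLast.map (fun o => o ++ "<next>"))
      ++ (((a :: b :: t).map blockOpen).getLast?.getD "") ++ "</block>"
      ++ String.join (List.replicate ((a :: b :: t).length - 1) "</next></block>") =
    blockOpen a ++ "<next>" ++
      (String.join (((b :: t).map blockOpen).dropLast.map (fun o => o ++ "<next>"))
        ++ (((b :: t).map blockOpen).getLast?.getD "") ++ "</block>"
        ++ String.join (List.replicate ((b :: t).length - 1) "</next></block>")) ++ "</next></block>"
  have hnil : String.join ([] : List String) = "" := rfl
  simp only [List.map_cons, List.dropLast_cons₂, List.getLast?_cons_cons, List.length_cons,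
    Nat.add_sub_cancel, List.replicate_succ', str_join_cons, str_join_append, hnil]
  simp [String.append_assoc]

theorem actions_to_xml_eq_alt (actions : List String) :
    actions_to_xml actions = actions_to_xml_alt actions := by
  induction actions with
  | nil => rfl
  | cons a rest ih =>
    cases rest with
    | nil =>
      rw [A_cons]
      show _ = String.join (([a].map blockOpen).dropLast.map (fun o => o ++ "<next>"))
          ++ (([a].map blockOpen).getLast?.getD "") ++ "</block>"
          ++ String.join (List.replicate ([a].length - 1) "</next></block>")
      simp [actions_to_xml, String.join]
    | cons b t =>
      rw [A_cons, alt_cons_cons, ← ih, if_neg (actions_to_xml_ne_empty b t)]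
      have hlit : ("</next>" : String) ++ "</block>" = "</next></block>" := rfl
      simp only [String.append_assoc, hlit]

-- ===== VERDICT (by name: the statement is the Claim_ definition above) =====
theorem actions_to_xml_spec : Claim_equal_actions_to_xml := by
  intro actions _
  unfold Spec_actions_to_xml
  exact actions_to_xml_eq_alt actions
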